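-- pv_equiv track=rewrite | github.com/Mgkgr/megabonk | megabonk_bot/navigation.py | _lane_labels
-- ===== SOURCE A (Python) =====
-- def _lane_labels(lane_count: int) -> tuple[str, ...]:
--     if lane_count == 3:
--         return ("left", "center", "right")
--     if lane_count == 5:
--         return ("left_far", "left", "center", "right", "right_far")
--     center = lane_count // 2
--     labels = []
--     for index in range(lane_count):
--         if index == center:
--             labels.append("center")
--             continue
--         offset = abs(index - center)
--         side = "left" if index < center else "right"
--         labels.append(side if offset == 1 else f"{side}_{offset}")
--     return tuple(labels)
-- ===== SOURCE B (Python) =====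
-- def _lane_labels(lane_count: int) -> tuple[str, ...]:
--     if lane_count == 5:
--         return ("left_far", "left", "center", "right", "right_far")
--     if lane_count <= 0:
--         return ()
--     center = lane_count // 2
--     left = ["left" if off == 1 else f"left_{off}" for off in range(center, 0, -1)]
--     right = ["right" if off == 1 else f"right_{off}" for off in range(1, lane_count - center)]
--     return tuple(left + ["center"] + right)
-- ===== Notes on version B (the rewrite author's own statement) =====
-- stated objective: alternative
-- what changed: Replaces the single symmetric index scan (computing abs(index-center) per index) with direct construction of three concatenated pieces: a left list of offsets counted down from center, the 'center' element, and a right list of offsets counted up; the redundant three-lane special case is dropped since the general path produces the same labels.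
import Mathlib
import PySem

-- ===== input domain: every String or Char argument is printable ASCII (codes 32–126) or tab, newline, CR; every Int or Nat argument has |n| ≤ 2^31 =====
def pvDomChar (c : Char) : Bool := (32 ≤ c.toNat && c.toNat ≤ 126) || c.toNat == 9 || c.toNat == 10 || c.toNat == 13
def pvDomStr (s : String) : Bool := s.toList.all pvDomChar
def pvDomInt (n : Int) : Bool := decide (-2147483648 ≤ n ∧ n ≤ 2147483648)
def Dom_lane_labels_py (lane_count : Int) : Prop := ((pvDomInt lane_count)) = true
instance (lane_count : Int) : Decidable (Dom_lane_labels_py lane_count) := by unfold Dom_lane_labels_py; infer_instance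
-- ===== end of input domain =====

-- B builds the label list as three concatenated pieces (left offsets counted down,
-- "center", right offsets counted up) instead of A's single symmetric index scan;
-- objective: alternative decomposition of the same O(n) construction.

-- ===== PORT A =====
def lane_labels_py (lane_count : Int) : List String :=
  if lane_count = 3 then ["left", "center", "right"]
  else if lane_count = 5 then ["left_far", "left", "center", "right", "right_far"]
  else
    let center := PySem.Int.floordiv lane_count 2
    let labels : List String :=
      (PySem.List.pyRange 0 lane_count 1).foldl (fun labels index =>
        if index = center then labels ++ ["center"]
        else
          let offset := |index - center|
          let side := if index < center then "left" else "right"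
          labels ++ [if offset = 1 then side else side ++ "_" ++ PySem.Int.toStr offset]) []
    labels

-- ===== PORT B =====
def lane_labels_py_alt (lane_count : Int) : List String :=
  if lane_count = 5 then ["left_far", "left", "center", "right", "right_far"]
  else if lane_count ≤ 0 then []
  else
    let center := PySem.Int.floordiv lane_count 2
    let left := (PySem.List.pyRange center 0 (-1)).map
      (fun off => if off = 1 then "left" else "left_" ++ PySem.Int.toStr off)
    let right := (PySem.List.pyRange 1 (lane_count - center) 1).map
      (fun off => if off = 1 then "right" else "right_" ++ PySem.Int.toStr off)
    left ++ ["center"] ++ right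

-- ===== PRECONDITION & SPEC =====
def Spec_lane_labels_py (lane_count : Int) (out : List String) : Prop := out = lane_labels_py_alt lane_count
instance (lane_count : Int) (out : List String) : Decidable (Spec_lane_labels_py lane_count out) := by unfold Spec_lane_labels_py; infer_instance

-- ===== CLAIM (what is proved, stated in full; the proofs are below) =====
def Claim_equal_lane_labels_py : Prop := ∀ (lane_count : Int), Dom_lane_labels_py lane_count → Spec_lane_labels_py lane_count (lane_labels_py lane_count)

-- ===== LEMMAS AND PROOFS =====

-- the per-index label A computes
def pvGA (c i : Int) : String :=
  if i = c then "center"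
  else
    let offset := |i - c|
    let side := if i < c then "left" else "right"
    if offset = 1 then side else side ++ "_" ++ PySem.Int.toStr offset

theorem pv_foldl_snoc (g : Int → String) :
    ∀ (l : List Int) (acc : List String),
      l.foldl (fun a i => a ++ [g i]) acc = acc ++ l.map g := by
  intro l
  induction l with
  | nil => intro acc; simp
  | cons x xs ih => intro acc; simp [List.foldl, ih]

theorem pv_body_eq (c : Int) :
    (fun (labels : List String) (index : Int) =>
      if index = c then labels ++ ["center"]
      else
        let offset := |index - c|
        let side := if index < c then "left" else "right"
        labels ++ [if offset = 1 then side else side ++ "_" ++ PySem.Int.toStr offset])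
    = (fun a i => a ++ [pvGA c i]) := by
  funext a i
  by_cases h : i = c <;> simp [pvGA, h]

theorem pv_general (n : Int) (h1 : 1 ≤ n) :
    (PySem.List.pyRange 0 n 1).map (pvGA (PySem.Int.floordiv n 2))
      = lane_labels_py_alt n ∨ n = 5 := by
  by_cases h5 : n = 5
  · exact Or.inr h5
  refine Or.inl ?_
  set c := PySem.Int.floordiv n 2 with hc
  have hce : c = n / 2 := PySem.Int.floordiv_eq_ediv_of_pos (by norm_num)
  have hcnn : 0 ≤ c := by omega
  have hclt : c < n := by omega
  have hsplit : PySem.List.pyRange 0 n 1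
      = PySem.List.pyRange 0 c 1 ++ PySem.List.pyRange c (c+1) 1 ++ PySem.List.pyRange (c+1) n 1 := by
    rw [← PySem.List.pyRange_one_append 0 c (c+1) hcnn (by omega),
        ← PySem.List.pyRange_one_append 0 (c+1) n (by omega) (by omega)]
  rw [hsplit]
  simp only [List.map_append, PySem.List.pyRange_one_singleton, List.map_cons, List.map_nil]
  rw [lane_labels_py_alt]
  rw [if_neg h5, if_neg (by omega)]
  simp only [← hc]
  have hmid : pvGA c c = "center" := by simp [pvGA]
  rw [hmid]
  congr 1
  · congr 1
    -- left piece
    rw [PySem.List.pyRange_neg_one, PySem.List.pyRange_one, List.map_map, List.map_map]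
    refine List.map_congr_left ?_
    intro k hk
    simp only [List.mem_range] at hk
    have hki : (k : Int) < c := by omega
    simp only [Function.comp, zero_add]
    rw [pvGA, if_neg (by omega)]
    have habs : |(k : Int) - c| = c - k := by
      rw [abs_sub_comm, abs_of_nonneg (by omega)]
    simp only [habs, if_pos hki]
    split_ifs <;> rfl
  · -- right piece
    rw [PySem.List.pyRange_one, PySem.List.pyRange_one, List.map_map, List.map_map]
    have hlen : (n - (c + 1)).toNat = (n - c - 1).toNat := by omega
    rw [hlen]
    refine List.map_congr_left ?_
    intro k hk
    simp only [List.mem_range] at hk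
    simp only [Function.comp]
    rw [pvGA, if_neg (by omega)]
    have habs : |(c + 1 + (k : Int)) - c| = 1 + k := by
      rw [abs_of_nonneg (by omega)]; ring
    simp only [habs, if_neg (by omega : ¬ (c + 1 + (k : Int) < c))]
    split_ifs <;> rfl

-- ===== VERDICT (by name: the statement is the Claim_ definition above) =====
theorem lane_labels_py_spec : Claim_equal_lane_labels_py := by
  intro n _
  unfold Spec_lane_labels_py lane_labels_py
  by_cases h3 : n = 3
  · subst h3; decide
  by_cases h5 : n = 5
  · subst h5; decide
  rw [if_neg h3, if_neg h5]
  by_cases hpos : 1 ≤ n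
  · simp only [pv_body_eq, pv_foldl_snoc, List.nil_append]
    rcases pv_general n hpos with h | h
    · simpa using h
    · exact absurd h h5
  · rw [PySem.List.pyRange_one_eq_nil (by omega)]
    rw [lane_labels_py_alt, if_neg h5, if_pos (by omega)]
    simp
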